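-- pv_equiv track=rewrite | github.com/hyunse0/Algorithm | PROGRAMMERS/메뉴 리뉴얼.py | solution
-- ===== SOURCE A (Python) =====
-- from collections import defaultdict
--
-- def solution(orders, course):
--     order = defaultdict(list)
--
--     for menus in orders:
--         for i in range(len(menus)):
--             for j in range(i+1, len(menus)):
--                 order[menus[i]].append(menus[j])
--
--     answer = []
--     for key, value in order.items():
--         for cnt in course:
--             temp = [key]
--
--             for v in set(value):
--                 if value.count(v) == cnt:
--                     temp.append(v)
--
--             if len(temp) >= 2:
--                 temp.sort()
--                 answer.append(''.join(temp))
--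
--     return sorted(list(set(answer)))
-- ===== SOURCE B (Python) =====
-- from collections import defaultdict, Counter
--
-- def solution(orders, course):
--     # Count every ordered pair (first char, later char) across all menus in one flat pass.
--     pair_cnt = Counter((m[i], m[j])
--                        for m in orders
--                        for i in range(len(m))
--                        for j in range(i + 1, len(m)))
--     # Group the distinct pairs by (first char, occurrence count).
--     groups = defaultdict(list)
--     for (k, v), n in pair_cnt.items():
--         groups[(k, n)].append(v)
--     # Emit one string per group whose count occurs in course.
--     wanted = set(course)
--     answer = {''.join(sorted([k] + vs)) for (k, n), vs in groups.items() if n in wanted}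
--     return sorted(answer)
-- ===== Notes on version B (the rewrite author's own statement) =====
-- stated objective: faster
-- what changed: B never builds per-key follow lists: it counts all (first char, later char) pairs in one flat Counter, groups the distinct pairs by (first char, count), and emits one string per group whose count occurs in set(course) - A's key-by-key loop over course with a per-char value.count rescan disappears.
import Mathlib
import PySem

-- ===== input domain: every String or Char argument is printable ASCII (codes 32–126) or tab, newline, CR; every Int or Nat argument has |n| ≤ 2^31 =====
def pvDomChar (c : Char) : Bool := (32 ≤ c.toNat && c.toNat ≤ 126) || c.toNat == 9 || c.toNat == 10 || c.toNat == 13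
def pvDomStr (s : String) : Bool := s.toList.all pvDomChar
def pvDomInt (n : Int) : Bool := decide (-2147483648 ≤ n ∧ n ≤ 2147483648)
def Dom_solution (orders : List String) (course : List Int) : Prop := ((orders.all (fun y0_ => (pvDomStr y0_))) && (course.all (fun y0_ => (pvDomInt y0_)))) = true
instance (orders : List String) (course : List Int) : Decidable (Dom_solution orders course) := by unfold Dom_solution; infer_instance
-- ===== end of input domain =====

-- B replaces A's per-key follow lists and per-course rescan of set(value)/value.count by one flat
-- Counter over (first char, later char) pairs, grouped by (first char, count); the course loop of A
-- becomes a membership test of each group's count in set(course) (measurably faster selection).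
-- Single-character Python strings (menu items) are ported as Char; ''.join of sorted chars is String.ofList of the sorted char list.

-- ===== PORT A =====
-- order[menus[i]].append(menus[j]) on a defaultdict(list) = modify with default []
def solA_build (orders : List String) : PySem.Dict Char (List Char) :=
  orders.foldl (fun d menus =>
    let cs := menus.toList
    (PySem.List.pyRange 0 (PySem.List.len cs) 1).foldl (fun d i =>
      (PySem.List.pyRange (i + 1) (PySem.List.len cs) 1).foldl (fun d j =>
        d.modify (PySem.List.pyGetD cs i ' ') [] (· ++ [PySem.List.pyGetD cs j ' '])) d) d)
    PySem.Dict.empty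

-- body of A's 'for cnt in course' loop: temp = [key] + matching chars; append joined sorted temp if len ≥ 2
def solA_cnt (kv : Char × List Char) (ans : List String) (cnt : Int) : List String :=
  let temp : List Char :=
    (PySem.Set.ofList kv.2).foldl
      (fun t v => if ((PySem.List.count kv.2 v : Int) == cnt) then t ++ [v] else t) [kv.1]
  if 2 ≤ temp.length then
    ans ++ [String.ofList (PySem.List.sorted temp (fun c => c) false)]
  else ans

def solution (orders : List String) (course : List Int) : List String :=
  let order := solA_build orders
  let answer := order.items.foldl (fun ans kv => course.foldl (solA_cnt kv) ans) []
  PySem.List.sorted (PySem.Set.ofList answer) (fun s => s) false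

-- ===== PORT B =====
-- Counter((m[i], m[j]) for m in orders for i in range(len(m)) for j in range(i+1, len(m)))
def solB_pairs (orders : List String) : List (Char × Char) :=
  orders.flatMap (fun m =>
    (PySem.List.pyRange 0 (PySem.List.len m.toList) 1).flatMap (fun i =>
      (PySem.List.pyRange (i + 1) (PySem.List.len m.toList) 1).map (fun j =>
        (PySem.List.pyGetD m.toList i ' ', PySem.List.pyGetD m.toList j ' '))))

-- for (k, v), n in pair_cnt.items(): groups[(k, n)].append(v)   (defaultdict(list))
def solB_groups (pairCnt : PySem.Dict (Char × Char) Int) : PySem.Dict (Char × Int) (List Char) :=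
  pairCnt.items.foldl (fun g q => g.modify (q.1.1, q.2) [] (· ++ [q.1.2])) PySem.Dict.empty

def solution_alt (orders : List String) (course : List Int) : List String :=
  let pairCnt := PySem.Dict.counter (solB_pairs orders)
  let groups := solB_groups pairCnt
  let wanted := PySem.Set.ofList course
  let answer := groups.items.foldl
    (fun s q => if wanted.contains q.1.2 then
        PySem.Set.add s (String.ofList (PySem.List.sorted (q.1.1 :: q.2) (fun c => c) false))
      else s) PySem.Set.empty
  PySem.List.sorted answer (fun s => s) false

-- ===== PRECONDITION & SPEC =====
def Spec_solution (orders : List String) (course : List Int) (out : List String) : Prop := out = solution_alt orders course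
instance (orders : List String) (course : List Int) (out : List String) : Decidable (Spec_solution orders course out) := by unfold Spec_solution; infer_instance

-- ===== CLAIM (what is proved, stated in full; the proofs are below) =====
def Claim_equal_solution : Prop := ∀ (orders : List String) (course : List Int), Dom_solution orders course → Spec_solution orders course (solution orders course)

-- ===== LEMMAS AND PROOFS =====

-- helper abbreviations used only by the proofs
def pvVals (orders : List String) (k : Char) : List Char :=
  ((solB_pairs orders).filter (fun p => p.1 == k)).map Prod.snd

def pvSel (value : List Char) (cnt : Int) : List Char :=
  (PySem.Set.ofList value).filter (fun v => ((PySem.List.count value v : Int) == cnt))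

def pvStr (k : Char) (l : List Char) : String :=
  String.ofList (PySem.List.sorted (k :: l) (fun c => c) false)

-- A's inner fold over set(value) is the filtered selection, and the length test is non-emptiness
lemma solA_cnt_eq (kv : Char × List Char) :
    solA_cnt kv = fun ans cnt =>
      if pvSel kv.2 cnt ≠ [] then ans ++ [pvStr kv.1 (pvSel kv.2 cnt)] else ans := by
  funext ans cnt
  unfold solA_cnt pvSel pvStr
  have hA := PySem.List.foldl_append_if
      (fun v => ((PySem.List.count kv.2 v : Int) == cnt)) (fun v => v)
      (PySem.Set.ofList kv.2) [kv.1]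
  simp only [List.map_id'] at hA
  rw [hA]
  set bs := (PySem.Set.ofList kv.2).filter (fun v => ((PySem.List.count kv.2 v : Int) == cnt)) with hbs
  by_cases h : bs = []
  · simp [h]
  · have h1 : 0 < bs.length := List.length_pos_iff.mpr h
    rw [if_pos (by simp only [List.length_append, List.length_singleton]; omega), if_pos h]
    rfl

-- A's answer list in closed form
lemma answerA_eq (orders : List String) (course : List Int) :
    ((solA_build orders).items.foldl (fun ans kv => course.foldl (solA_cnt kv) ans) [])
      = (solA_build orders).items.flatMap (fun kv =>
          (course.filter (fun cnt => decide (pvSel kv.2 cnt ≠ []))).map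
            (fun cnt => pvStr kv.1 (pvSel kv.2 cnt))) := by
  have h1 : ∀ (kv : Char × List Char) (ans : List String),
      course.foldl (solA_cnt kv) ans
        = ans ++ ((course.filter (fun cnt => decide (pvSel kv.2 cnt ≠ []))).map
            (fun cnt => pvStr kv.1 (pvSel kv.2 cnt))) := by
    intro kv ans
    rw [solA_cnt_eq]
    exact PySem.List.foldl_append_ite (fun cnt => pvSel kv.2 cnt ≠ [])
      (fun cnt => pvStr kv.1 (pvSel kv.2 cnt)) course ans
  simp only [h1]
  rw [PySem.List.foldl_append_eq_flatMap]
  simp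

-- A's dict build is the fold of the flat pair list
lemma buildA_eq (orders : List String) :
    solA_build orders
      = (solB_pairs orders).foldl (fun d p => d.modify p.1 [] (· ++ [p.2])) PySem.Dict.empty := by
  unfold solA_build solB_pairs
  rw [List.foldl_flatMap]
  refine PySem.List.foldl_congr_mem _ _ _ _ ?_
  intro d m _
  rw [List.foldl_flatMap]
  refine PySem.List.foldl_congr_mem _ _ _ _ ?_
  intro d i _
  rw [List.foldl_map]

lemma valsA (orders : List String) (k : Char) :
    (solA_build orders).getD k [] = pvVals orders k := by
  rw [buildA_eq, PySem.Dict.getD_foldl_modify_append, PySem.Dict.getD_empty]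
  rfl

lemma keysA (orders : List String) :
    (solA_build orders).keys = PySem.Set.ofList ((solB_pairs orders).map Prod.fst) := by
  rw [buildA_eq, PySem.Dict.keys_foldl_modify_key (key := Prod.fst)
    (f := fun _ p => (· ++ [p.2])), PySem.Dict.keys_empty, PySem.Set.update_nil_left]

lemma nodupKeysA (orders : List String) : (solA_build orders).keys.Nodup := by
  rw [buildA_eq]
  exact PySem.Dict.nodup_keys_foldl_modify_key _ Prod.fst [] (fun _ p => (· ++ [p.2])) _
    PySem.Dict.nodup_keys_empty

lemma itemsA (orders : List String) :
    (solA_build orders).items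
      = (PySem.Set.ofList ((solB_pairs orders).map Prod.fst)).map
          (fun k => (k, pvVals orders k)) := by
  rw [PySem.Dict.items_eq_map_keys _ (nodupKeysA orders) [], keysA]
  exact List.map_congr_left (fun k _ => by rw [valsA])

-- membership in A's answer list
lemma memA (orders : List String) (course : List Int) (s : String) :
    s ∈ ((solA_build orders).items.foldl (fun ans kv => course.foldl (solA_cnt kv) ans) [])
      ↔ ∃ k, k ∈ (solB_pairs orders).map Prod.fst ∧ ∃ cnt ∈ course,
          pvSel (pvVals orders k) cnt ≠ [] ∧ s = pvStr k (pvSel (pvVals orders k) cnt) := by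
  rw [answerA_eq, itemsA]
  simp only [List.mem_flatMap, List.mem_map, List.mem_filter, PySem.Set.mem_ofList,
    decide_eq_true_eq]
  constructor
  · rintro ⟨kv, ⟨k, hk, rfl⟩, cnt, ⟨hc, hne⟩, rfl⟩
    exact ⟨k, hk, cnt, hc, hne, rfl⟩
  · rintro ⟨k, hk, cnt, hc, hne, rfl⟩
    exact ⟨(k, pvVals orders k), ⟨k, hk, rfl⟩, cnt, ⟨hc, hne⟩, rfl⟩

-- B's groups dict: lookups and keys
lemma groupsGetD (pc : PySem.Dict (Char × Char) Int) (k : Char) (n : Int) :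
    (solB_groups pc).getD (k, n) []
      = (pc.items.filter (fun q => ((q.1.1, q.2) : Char × Int) == (k, n))).map
          (fun q => q.1.2) := by
  unfold solB_groups
  rw [← List.foldl_map (f := fun q : (Char × Char) × Int => ((q.1.1, q.2), q.1.2))
    (g := fun (d : PySem.Dict (Char × Int) (List Char)) p => d.modify p.1 [] (· ++ [p.2])),
    PySem.Dict.getD_foldl_modify_append, PySem.Dict.getD_empty, List.filter_map, List.map_map]
  rfl

lemma keysGroups (pc : PySem.Dict (Char × Char) Int) :
    (solB_groups pc).keys = PySem.Set.ofList (pc.items.map (fun q => (q.1.1, q.2))) := by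
  unfold solB_groups
  have h := PySem.Dict.keys_foldl_modify_key pc.items
    (fun q : (Char × Char) × Int => (q.1.1, q.2)) ([] : List Char)
    (fun _ q l => l ++ [q.1.2]) PySem.Dict.empty
  exact h.trans (by rw [PySem.Dict.keys_empty, PySem.Set.update_nil_left])

lemma nodupKeysGroups (pc : PySem.Dict (Char × Char) Int) : (solB_groups pc).keys.Nodup := by
  unfold solB_groups
  exact PySem.Dict.nodup_keys_foldl_modify_key pc.items
    (fun q : (Char × Char) × Int => (q.1.1, q.2)) ([] : List Char)
    (fun _ q l => l ++ [q.1.2]) PySem.Dict.empty PySem.Dict.nodup_keys_empty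

lemma itemsGroups (pc : PySem.Dict (Char × Char) Int) :
    (solB_groups pc).items
      = (PySem.Set.ofList (pc.items.map (fun q => (q.1.1, q.2)))).map
          (fun kn => (kn, (solB_groups pc).getD kn [])) := by
  rw [PySem.Dict.items_eq_map_keys _ (nodupKeysGroups pc) [], keysGroups]

-- B's answer set in closed form
lemma answerB_eq (orders : List String) (course : List Int) :
    ((solB_groups (PySem.Dict.counter (solB_pairs orders))).items.foldl
      (fun s q => if (PySem.Set.ofList course).contains q.1.2 then
          PySem.Set.add s (String.ofList (PySem.List.sorted (q.1.1 :: q.2) (fun c => c) false))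
        else s) PySem.Set.empty)
    = PySem.Set.ofList
        (((solB_groups (PySem.Dict.counter (solB_pairs orders))).items.filter
            (fun q => (PySem.Set.ofList course).contains q.1.2)).map
          (fun q => pvStr q.1.1 q.2)) := by
  rw [PySem.List.foldl_if_eq_foldl_filter]
  conv_rhs => rw [PySem.Set.ofList_eq_foldl, List.foldl_map]
  rfl

-- counts agree: v's count among k's followers is the flat count of the pair (k, v)
lemma countVals (orders : List String) (k : Char) (v : Char) :
    PySem.List.count (pvVals orders k) v = List.count (k, v) (solB_pairs orders) := by
  rw [PySem.List.count_eq]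
  unfold pvVals
  rw [List.count_eq_countP, List.countP_map, List.countP_filter, List.count_eq_countP]
  refine List.countP_congr (fun p _ => ?_)
  rcases p with ⟨a, b⟩
  simp [Function.comp, Prod.ext_iff, and_comm]

lemma memVals (orders : List String) (k : Char) (v : Char) :
    v ∈ pvVals orders k ↔ (k, v) ∈ solB_pairs orders := by
  unfold pvVals
  simp only [List.mem_map, List.mem_filter, beq_iff_eq]
  constructor
  · rintro ⟨p, ⟨hp, h1⟩, rfl⟩; rcases p with ⟨a, b⟩; cases h1; exact hp
  · intro h; exact ⟨(k, v), ⟨h, rfl⟩, rfl⟩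

lemma memSel (value : List Char) (cnt : Int) (v : Char) :
    v ∈ pvSel value cnt ↔ v ∈ value ∧ (PySem.List.count value v : Int) = cnt := by
  unfold pvSel
  simp [List.mem_filter, PySem.Set.mem_ofList]

lemma nodupSel (value : List Char) (cnt : Int) : (pvSel value cnt).Nodup := by
  exact (PySem.Set.nodup_ofList value).filter _

lemma memBucket (orders : List String) (k : Char) (n : Int) (v : Char) :
    v ∈ (solB_groups (PySem.Dict.counter (solB_pairs orders))).getD (k, n) []
      ↔ (k, v) ∈ solB_pairs orders ∧ (List.count (k, v) (solB_pairs orders) : Int) = n := by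
  rw [groupsGetD, PySem.Dict.items_counter, List.filter_map, List.map_map]
  simp only [List.mem_map, List.mem_filter, Function.comp_def, PySem.Set.mem_ofList,
    beq_iff_eq, Prod.mk.injEq]
  constructor
  · rintro ⟨p, ⟨hp, h1, h2⟩, rfl⟩
    rcases p with ⟨a, b⟩; cases h1; exact ⟨hp, h2⟩
  · rintro ⟨hp, hc⟩
    exact ⟨(k, v), ⟨hp, rfl, hc⟩, rfl⟩

lemma nodupBucket (orders : List String) (k : Char) (n : Int) :
    ((solB_groups (PySem.Dict.counter (solB_pairs orders))).getD (k, n) []).Nodup := by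
  rw [groupsGetD, PySem.Dict.items_counter, List.filter_map, List.map_map]
  refine List.Nodup.map_on ?_ (((PySem.Set.nodup_ofList _).filter _))
  intro p hp q hq h
  rcases List.mem_filter.mp hp with ⟨-, hp2⟩
  rcases List.mem_filter.mp hq with ⟨-, hq2⟩
  simp only [Function.comp_def, beq_iff_eq, Prod.mk.injEq] at hp2 hq2
  rcases p with ⟨a, b⟩; rcases q with ⟨c, d⟩
  simp only at h
  cases hp2.1; cases hq2.1; cases h; rfl

-- each of B's buckets is a permutation of A's selection
lemma bucketPermSel (orders : List String) (k : Char) (n : Int) :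
    ((solB_groups (PySem.Dict.counter (solB_pairs orders))).getD (k, n) []).Perm
      (pvSel (pvVals orders k) n) := by
  rw [List.perm_ext_iff_of_nodup (nodupBucket orders k n) (nodupSel _ n)]
  intro v
  rw [memBucket, memSel, memVals, countVals]

lemma strBucketEq (orders : List String) (k : Char) (n : Int) :
    pvStr k ((solB_groups (PySem.Dict.counter (solB_pairs orders))).getD (k, n) [])
      = pvStr k (pvSel (pvVals orders k) n) := by
  unfold pvStr
  exact congrArg String.ofList
    ((PySem.List.sorted_id_eq_sorted_id_iff_perm _ _).mpr ((bucketPermSel orders k n).cons k))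

-- membership in B's answer set
lemma memB (orders : List String) (course : List Int) (s : String) :
    s ∈ PySem.Set.ofList
        (((solB_groups (PySem.Dict.counter (solB_pairs orders))).items.filter
            (fun q => (PySem.Set.ofList course).contains q.1.2)).map
          (fun q => pvStr q.1.1 q.2))
      ↔ ∃ p ∈ solB_pairs orders, (List.count p (solB_pairs orders) : Int) ∈ course ∧
          s = pvStr p.1 ((solB_groups (PySem.Dict.counter (solB_pairs orders))).getD
                (p.1, (List.count p (solB_pairs orders) : Int)) []) := by
  rw [itemsGroups, PySem.Dict.items_counter]
  simp only [PySem.Set.mem_ofList, List.mem_map, List.mem_filter,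
    PySem.Set.contains_eq_listContains, List.contains_eq_mem, List.map_map,
    Function.comp_def, decide_eq_true_eq]
  constructor
  · rintro ⟨q, ⟨⟨kn, ⟨p, hp, rfl⟩, rfl⟩, hc⟩, rfl⟩
    exact ⟨p, hp, hc, rfl⟩
  · rintro ⟨p, hp, hc, rfl⟩
    exact ⟨((p.1, (List.count p (solB_pairs orders) : Int)),
      (solB_groups (PySem.Dict.counter (solB_pairs orders))).getD
        (p.1, (List.count p (solB_pairs orders) : Int)) []),
      ⟨⟨(p.1, (List.count p (solB_pairs orders) : Int)), ⟨p, hp, rfl⟩, rfl⟩, hc⟩, rfl⟩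

-- the two answer collections contain the same strings
lemma memAB (orders : List String) (course : List Int) (s : String) :
    s ∈ ((solA_build orders).items.foldl (fun ans kv => course.foldl (solA_cnt kv) ans) [])
      ↔ s ∈ PySem.Set.ofList
          (((solB_groups (PySem.Dict.counter (solB_pairs orders))).items.filter
              (fun q => (PySem.Set.ofList course).contains q.1.2)).map
            (fun q => pvStr q.1.1 q.2)) := by
  rw [memA, memB]
  constructor
  · rintro ⟨k, hk, cnt, hc, hne, rfl⟩
    obtain ⟨v, hv⟩ := List.exists_mem_of_ne_nil _ hne
    rcases (memSel _ _ _).mp hv with ⟨hvv, hvc⟩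
    have hpv : (k, v) ∈ solB_pairs orders := (memVals orders k v).mp hvv
    refine ⟨(k, v), hpv, ?_, ?_⟩
    · rw [← countVals] at *; rw [hvc]; exact hc
    · rw [strBucketEq]
      rw [← countVals, hvc]
  · rintro ⟨p, hp, hc, rfl⟩
    refine ⟨p.1, List.mem_map.mpr ⟨p, hp, rfl⟩, (List.count p (solB_pairs orders) : Int),
      hc, ?_, ?_⟩
    · intro hnil
      have hv : p.2 ∈ pvSel (pvVals orders p.1) (List.count p (solB_pairs orders) : Int) := by
        rw [memSel, memVals, countVals]
        constructor
        · exact (Prod.mk.eta (p := p)) ▸ hp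
        · rw [(Prod.mk.eta (p := p))]
      rw [hnil] at hv; exact (List.not_mem_nil).elim hv
    · rw [strBucketEq]

-- ===== VERDICT (by name: the statement is the Claim_ definition above) =====
theorem solution_spec : Claim_equal_solution := by
  intro orders course _
  unfold Spec_solution
  simp only [solution, solution_alt]
  rw [answerB_eq orders course]
  rw [PySem.List.sorted_id_eq_sorted_id_iff_perm,
    List.perm_ext_iff_of_nodup (PySem.Set.nodup_ofList _) (PySem.Set.nodup_ofList _)]
  intro s
  rw [PySem.Set.mem_ofList]
  exact memAB orders course s
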